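-- pv_equiv track=rewrite | github.com/SparknightLLC/ComfyUI-EnumCombo | enum_combo.py | _read_quoted_name
-- ===== SOURCE A (Python) =====
-- def _read_quoted_name(line: str, line_number: int) -> tuple[str, str]:
-- 	quote_char = line[0]
-- 	index = 1
-- 	escaped = False
-- 	chars = []
--
-- 	while index < len(line):
-- 		char = line[index]
-- 		if escaped:
-- 			if char == "n":
-- 				chars.append("\n")
-- 			elif char == "t":
-- 				chars.append("\t")
-- 			else:
-- 				chars.append(char)
-- 			escaped = False
-- 		elif char == "\\":
-- 			escaped = True
-- 		elif char == quote_char: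
-- 			return ("".join(chars), line[index + 1:].strip())
-- 		else:
-- 			chars.append(char)
-- 		index += 1
--
-- 	raise ValueError(f"Line {line_number}: unclosed quoted enum name.")
-- ===== SOURCE B (Python) =====
-- _ESC = {"n": "\n", "t": "\t"}
--
-- def _read_quoted_name(line: str, line_number: int) -> tuple[str, str]:
-- 	quote_char = line[0]
-- 	# pass 1: locate the unescaped closing quote (skip the char after each backslash)
-- 	end = -1
-- 	i = 1
-- 	n = len(line)
-- 	while i < n:
-- 		c = line[i]
-- 		if c == "\\":
-- 			i += 2
-- 		elif c == quote_char:
-- 			end = i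
-- 			break
-- 		else:
-- 			i += 1
-- 	if end < 0:
-- 		raise ValueError(f"Line {line_number}: unclosed quoted enum name.")
-- 	# pass 2: decode escapes by splitting the body on backslashes
-- 	parts = line[1:end].split("\\")
-- 	pieces = [parts[0]]
-- 	k = 1
-- 	while k < len(parts):
-- 		p = parts[k]
-- 		if p == "":
-- 			# double backslash: literal backslash, following part is plain text
-- 			pieces.append("\\")
-- 			k += 1
-- 			if k < len(parts):
-- 				pieces.append(parts[k])
-- 				k += 1
-- 		else:
-- 			pieces.append(_ESC.get(p[0], p[0]) + p[1:])
-- 			k += 1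
-- 	return ("".join(pieces), line[end + 1:].strip())
-- ===== Notes on version B (the rewrite author's own statement) =====
-- stated objective: alternative
-- what changed: Replaced A's single stateful character loop by two staged passes: first a scanner that only locates the index of the unescaped closing quote, then a decoder that splits the body on backslashes and reassembles it part-by-part (translating each part's escaped first character), so no per-character escape state exists.
import Mathlib
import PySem

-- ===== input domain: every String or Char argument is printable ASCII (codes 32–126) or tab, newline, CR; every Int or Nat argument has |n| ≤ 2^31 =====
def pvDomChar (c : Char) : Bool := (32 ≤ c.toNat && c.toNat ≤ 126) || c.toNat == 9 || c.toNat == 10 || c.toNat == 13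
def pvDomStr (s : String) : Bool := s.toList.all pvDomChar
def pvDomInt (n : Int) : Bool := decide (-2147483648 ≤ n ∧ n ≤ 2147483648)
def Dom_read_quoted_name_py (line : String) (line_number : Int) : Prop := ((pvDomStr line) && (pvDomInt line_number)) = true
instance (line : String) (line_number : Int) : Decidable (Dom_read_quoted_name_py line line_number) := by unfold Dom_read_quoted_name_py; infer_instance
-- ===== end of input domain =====

-- B replaces A's single stateful character loop by two staged passes — locate the closing
-- quote, then decode the body by splitting on backslashes (objective: alternative).

-- ===== PORT A =====
-- escape translation of A's branch chain: "n"→newline, "t"→tab, else itself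
def pvTr (c : Char) : Char := if c = 'n' then '\n' else if c = 't' then '\t' else c

-- A's while-loop: state = (escaped, chars); one character per step
def pvGoA (q : Char) (escaped : Bool) (acc : List Char) : List Char → Option (String × String)
  | [] => none   -- loop ends: Python raises ValueError (excluded by Pre_)
  | c :: rest =>
    if escaped then pvGoA q false (acc ++ [pvTr c]) rest
    else if c = '\\' then pvGoA q true acc rest
    else if c = q then some (String.ofList acc, PySem.Str.strip (String.ofList rest))
    else pvGoA q false (acc ++ [c]) rest

def read_quoted_name_py (line : String) (line_number : Int) : String × String :=
  match line.toList with
  | [] => ("", "")   -- Python raises IndexError on line[0]; excluded by Pre_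
  | q :: rest => (pvGoA q false [] rest).getD ("", "")

-- ===== PORT B =====
-- B's pass 1: index of the unescaped closing quote within the suffix after the opening
-- quote (a backslash skips the following character), none if the loop runs off the end
def pvFindB (q : Char) : List Char → Option Nat
  | [] => none
  | c :: rest =>
    if c = '\\' then
      match rest with
      | [] => none                               -- i += 2 runs past the end
      | _ :: rest' => (pvFindB q rest').map (· + 2)
    else if c = q then some 0
    else (pvFindB q rest).map (· + 1)

-- exact hand port of Python str.split(sep) for a one-char separator (keeps empty parts)
def pvSplit (sep : Char) : List Char → List (List Char)
  | [] => [[]]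
  | c :: rest =>
    if c = sep then [] :: pvSplit sep rest
    else
      match pvSplit sep rest with
      | [] => [[c]]                              -- unreachable: pvSplit is never []
      | p :: ps => (c :: p) :: ps

-- B's pass-2 while-loop over parts[1:]: each part follows a backslash; an empty part is a
-- double backslash (literal backslash, next part plain), else translate the first char
def pvDecode : List (List Char) → List Char
  | [] => []
  | [] :: ps =>
    '\\' :: (match ps with
             | [] => []
             | p2 :: ps2 => p2 ++ pvDecode ps2)
  | (d :: ds) :: ps => pvTr d :: ds ++ pvDecode ps

-- decode a quoted body: parts = body.split("\\"); parts[0] plain, rest via the loop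
def pvDecodeBody (body : List Char) : List Char :=
  match pvSplit '\\' body with
  | [] => []                                     -- unreachable: pvSplit is never []
  | p :: ps => p ++ pvDecode ps

def read_quoted_name_py_alt (line : String) (line_number : Int) : String × String :=
  match line.toList with
  | [] => ("", "")   -- Python raises IndexError on line[0]; excluded by Pre_
  | q :: rest =>
    match pvFindB q rest with
    | none => ("", "")   -- end < 0: Python raises ValueError; excluded by Pre_
    | some e => (String.ofList (pvDecodeBody (rest.take e)),
                 PySem.Str.strip (String.ofList (rest.drop (e + 1))))

-- ===== PRECONDITION & SPEC =====
-- length of the maximal run of backslashes immediately before index i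
def pvRunBefore (l : List Char) (i : Nat) : Nat := ((l.take i).reverse.takeWhile (· = '\\')).length

-- Pre_ excludes exactly the inputs where Python A raises: the empty line (IndexError) and
-- lines with no unescaped closing quote — including any line whose quote char is a backslash
-- and any line ending in a dangling backslash — on which A raises ValueError.
def Pre_read_quoted_name_py (line : String) (line_number : Int) : Prop :=
  line.toList ≠ [] ∧ line.toList.head? ≠ some '\\' ∧
  ∃ i < line.toList.length, 1 ≤ i ∧ line.toList[i]? = line.toList.head? ∧ pvRunBefore line.toList i % 2 = 0
instance (line : String) (line_number : Int) : Decidable (Pre_read_quoted_name_py line line_number) := by unfold Pre_read_quoted_name_py; infer_instance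

def pvWitness_read_quoted_name_py : String × Int := ("'enum name'  ", 3)

def Spec_read_quoted_name_py (line : String) (line_number : Int) (out : String × String) : Prop := out = read_quoted_name_py_alt line line_number
instance (line : String) (line_number : Int) (out : String × String) : Decidable (Spec_read_quoted_name_py line line_number out) := by unfold Spec_read_quoted_name_py; infer_instance

-- ===== CLAIM (what is proved, stated in full; the proofs are below) =====
def Claim_equal_read_quoted_name_py : Prop := ∀ (line : String) (line_number : Int), Dom_read_quoted_name_py line line_number → Pre_read_quoted_name_py line line_number → Spec_read_quoted_name_py line line_number (read_quoted_name_py line line_number)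

-- ===== LEMMAS AND PROOFS =====

-- pvSplit is never the empty list
theorem pvSplit_ne_nil (sep : Char) (l : List Char) : pvSplit sep l ≠ [] := by
  cases l with
  | nil => simp [pvSplit]
  | cons c rest =>
    simp only [pvSplit]
    split
    · simp
    · cases h : pvSplit sep rest <;> simp

-- unfoldings of pvFindB on a cons cell, one per branch of Source B's first loop
theorem pvFindB_bs (q d : Char) (rest' : List Char) :
    pvFindB q ('\\' :: d :: rest') = (pvFindB q rest').map (· + 2) := by
  rw [pvFindB.eq_def]; simp

theorem pvFindB_bs_nil (q : Char) : pvFindB q ['\\'] = none := by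
  rw [pvFindB.eq_def]; simp

theorem pvFindB_quote (q : Char) (rest : List Char) (hc : ¬ q = '\\') :
    pvFindB q (q :: rest) = some 0 := by
  rw [pvFindB.eq_def]; simp [hc]

theorem pvFindB_other (q c : Char) (rest : List Char) (hc : ¬ c = '\\') (hq : ¬ c = q) :
    pvFindB q (c :: rest) = (pvFindB q rest).map (· + 1) := by
  rw [pvFindB.eq_def]; simp [hc, hq]

-- split-decode unfolding: empty body
theorem pvDecodeBody_nil : pvDecodeBody [] = [] := by
  simp [pvDecodeBody, pvSplit, pvDecode]

-- split-decode unfolding: plain leading character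
theorem pvDecodeBody_cons (c : Char) (xs : List Char) (hc : c ≠ '\\') :
    pvDecodeBody (c :: xs) = c :: pvDecodeBody xs := by
  unfold pvDecodeBody
  simp only [pvSplit, if_neg hc]
  cases h : pvSplit '\\' xs with
  | nil => exact absurd h (pvSplit_ne_nil _ _)
  | cons p ps => simp

-- split-decode unfolding: a backslash escape consumes the next character
theorem pvDecodeBody_escape (d : Char) (xs : List Char) :
    pvDecodeBody ('\\' :: d :: xs) = pvTr d :: pvDecodeBody xs := by
  unfold pvDecodeBody
  simp only [pvSplit]
  by_cases hd : d = '\\'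
  · subst hd
    cases h : pvSplit '\\' xs with
    | nil => exact absurd h (pvSplit_ne_nil _ _)
    | cons p ps => simp [pvDecode, pvTr]
  · simp only [if_neg hd]
    cases h : pvSplit '\\' xs with
    | nil => exact absurd h (pvSplit_ne_nil _ _)
    | cons p ps => simp [pvDecode]

-- A's flag machine started unescaped equals B's find-then-split-decode pipeline
theorem pvGoA_eq_B (q : Char) : ∀ (n : Nat) (l : List Char), l.length ≤ n → ∀ acc,
    pvGoA q false acc l =
      match pvFindB q l with
      | none => none
      | some e => some (String.ofList (acc ++ pvDecodeBody (l.take e)),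
                        PySem.Str.strip (String.ofList (l.drop (e + 1)))) := by
  intro n
  induction n with
  | zero =>
    intro l h acc
    have hl : l = [] := List.eq_nil_of_length_eq_zero (Nat.le_zero.mp h)
    subst hl; simp [pvGoA, pvFindB]
  | succ n ih =>
    intro l h acc
    cases l with
    | nil => simp [pvGoA, pvFindB]
    | cons c rest =>
      simp only [List.length_cons] at h
      by_cases hc : c = '\\'
      · subst hc
        cases rest with
        | nil => simp [pvGoA, pvFindB_bs_nil]
        | cons d rest' =>
          simp only [List.length_cons] at h
          have hih := ih rest' (by omega) (acc ++ [pvTr d])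
          simp only [pvGoA, if_true, hih, pvFindB_bs]
          cases hf : pvFindB q rest' with
          | none => simp
          | some e =>
            simp [List.take_succ_cons, List.drop_succ_cons, pvDecodeBody_escape,
                  List.append_assoc]
      · by_cases hq : c = q
        · subst hq
          simp [pvGoA, hc, pvFindB_quote _ _ hc, pvDecodeBody_nil]
        · have hih := ih rest (by omega) (acc ++ [c])
          simp only [pvGoA, Bool.false_eq_true, if_false, if_neg hc, if_neg hq, hih,
                     pvFindB_other _ _ _ hc hq]
          cases hf : pvFindB q rest with
          | none => simp
          | some e =>
            simp [List.take_succ_cons, List.drop_succ_cons, pvDecodeBody_cons c _ hc,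
                  List.append_assoc]

-- ===== VERDICT (by name: the statement is the Claim_ definition above) =====
theorem read_quoted_name_py_spec : Claim_equal_read_quoted_name_py := by
  intro line line_number _ _
  unfold Spec_read_quoted_name_py read_quoted_name_py read_quoted_name_py_alt
  cases h : line.toList with
  | nil => rfl
  | cons q rest =>
    dsimp only
    rw [pvGoA_eq_B q rest.length rest le_rfl []]
    cases pvFindB q rest <;> simp
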